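-- pv_equiv track=rewrite | github.com/Goku879660/youtube_pipeline | video_engine.py | _build_highlight_groups
-- ===== SOURCE A (Python) =====
-- def _build_highlight_groups(words: list[str]) -> list[list[int]]:
--     count = len(words)
--     if count <= 0:
--         return []
--     if count <= 4:
--         group_size = 1
--     elif count <= 8:
--         group_size = 2
--     else:
--         group_size = 3
--     groups = []
--     for start in range(0, count, group_size):
--         groups.append(list(range(start, min(count, start + group_size))))
--     return groups
-- ===== SOURCE B (Python) =====
-- def _build_highlight_groups(words: list[str]) -> list[list[int]]:
--     count = len(words)
--     if count == 0:
--         return []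
--     group_size = 1 if count <= 4 else 2 if count <= 8 else 3
--     groups = []
--     pending = list(range(count))
--     while pending:
--         groups.append(pending[:group_size])
--         pending = pending[group_size:]
--     return groups
-- ===== Notes on version B (the rewrite author's own statement) =====
-- stated objective: alternative
-- what changed: Instead of looping over chunk start offsets and materialising each group as a range slice, B builds the index list once and consumes it with a while-loop that repeatedly splits off the leading group_size indices (head slice / rest slice) until nothing is pending.
import Mathlib
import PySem

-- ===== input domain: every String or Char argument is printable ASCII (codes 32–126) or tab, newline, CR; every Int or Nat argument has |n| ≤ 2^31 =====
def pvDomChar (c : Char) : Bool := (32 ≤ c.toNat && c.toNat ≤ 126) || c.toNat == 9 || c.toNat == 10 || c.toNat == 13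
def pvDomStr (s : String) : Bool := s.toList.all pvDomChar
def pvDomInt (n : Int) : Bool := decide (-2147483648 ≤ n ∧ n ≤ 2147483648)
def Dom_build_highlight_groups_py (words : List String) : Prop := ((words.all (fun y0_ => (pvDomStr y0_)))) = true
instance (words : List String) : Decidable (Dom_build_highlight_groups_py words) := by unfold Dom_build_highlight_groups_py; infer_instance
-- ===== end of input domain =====

-- B replaces A's loop over chunk start offsets (each group built as a range slice) by a
-- while-loop over a pending index list that repeatedly splits off the leading group_size
-- indices; same result, different decomposition (no speed claim).


-- ===== PORT A =====
def build_highlight_groups_py (words : List String) : List (List Int) :=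
  let count : Int := words.length
  if count ≤ 0 then []
  else
    let group_size : Int := if count ≤ 4 then 1 else if count ≤ 8 then 2 else 3
    (PySem.List.pyRange 0 count group_size).foldl
      (fun groups start =>
        groups ++ [PySem.List.pyRange start (min count (start + group_size)) 1]) []

-- ===== PORT B =====
-- The while-loop of Source B: pending is nonempty on entry and group_size ≥ 1, so
-- pending[:group_size] = head :: tail.take (group_size - 1) and
-- pending[group_size:] = tail.drop (group_size - 1); these take/drop forms are exact
-- for a nonnegative slice bound (PySem.List.slice_natCast).
def pvPending (g : Nat) : List Int → List (List Int)
  | [] => []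
  | x :: xs => (x :: xs.take (g - 1)) :: pvPending g (xs.drop (g - 1))
termination_by l => l.length
decreasing_by simp

def build_highlight_groups_py_alt (words : List String) : List (List Int) :=
  let count : Int := words.length
  if count = 0 then []
  else
    let group_size : Int := if count ≤ 4 then 1 else if count ≤ 8 then 2 else 3
    pvPending group_size.toNat (PySem.List.pyRange 0 count 1)

-- ===== PRECONDITION & SPEC =====
def Spec_build_highlight_groups_py (words : List String) (out : List (List Int)) : Prop := out = build_highlight_groups_py_alt words
instance (words : List String) (out : List (List Int)) : Decidable (Spec_build_highlight_groups_py words out) := by unfold Spec_build_highlight_groups_py; infer_instance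

-- ===== CLAIM (what is proved, stated in full; the proofs are below) =====
def Claim_equal_build_highlight_groups_py : Prop := ∀ (words : List String), Dom_build_highlight_groups_py words → Spec_build_highlight_groups_py words (build_highlight_groups_py words)

-- ===== LEMMAS AND PROOFS =====

-- pvPending on a nonempty list is one take-g chunk followed by the rest
theorem pvPending_cons (g : Nat) (hg : 0 < g) (x : Int) (xs : List Int) :
    pvPending g (x :: xs) = (x :: xs).take g :: pvPending g ((x :: xs).drop g) := by
  obtain ⟨k, rfl⟩ : ∃ k, g = k + 1 := ⟨g - 1, by omega⟩
  simp [pvPending]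

-- a positive-step range is its first element followed by the range shifted by the step
theorem pv_range_cons (g a b : Int) (hg : 0 < g) (hab : a < b) :
    PySem.List.pyRange a b g = a :: PySem.List.pyRange (a + g) b g := by
  rw [PySem.List.pyRange_of_pos _ _ hg, PySem.List.pyRange_of_pos _ _ hg, if_pos hab]
  have hq0 : 0 ≤ (b - a - 1) / g := Int.ediv_nonneg (by omega) (by omega)
  have h1 : (b - a + g - 1) / g = (b - a - 1) / g + 1 := by
    have h : b - a + g - 1 = (b - a - 1) + 1 * g := by ring
    rw [h, Int.add_mul_ediv_right _ _ (by omega)]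
  have h2 : b - (a + g) + g - 1 = b - a - 1 := by ring
  rw [h1, h2]
  have ht : ((b - a - 1) / g + 1).toNat = ((b - a - 1) / g).toNat + 1 := by omega
  rw [ht, List.range_succ_eq_map, List.map_cons]
  congr 1
  · simp
  · by_cases hb : a + g < b
    · rw [if_pos hb, List.map_map]
      apply List.map_congr_left
      intro k _
      simp [Nat.succ_eq_add_one]
      ring
    · rw [if_neg hb]
      have h0 : (b - a - 1) / g = 0 := Int.ediv_eq_zero_of_lt (by omega) (by omega)
      simp [h0]

-- the first g elements of a step-1 range
theorem pv_take_range (a b : Int) (g : Nat) :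
    (PySem.List.pyRange a b 1).take g = PySem.List.pyRange a (min b (a + g)) 1 := by
  rw [PySem.List.pyRange_one, PySem.List.pyRange_one, ← List.map_take, List.take_range]
  congr 2
  omega

-- dropping g elements of a step-1 range shifts its start by g
theorem pv_drop_range (a b : Int) (g : Nat) :
    (PySem.List.pyRange a b 1).drop g = PySem.List.pyRange (a + g) b 1 := by
  by_cases hab : a < b
  · by_cases hle : ((g : Int)) ≤ b - a
    · have hsplit := PySem.List.pyRange_one_append a (a + g) b (by omega) (by omega)
      rw [hsplit, List.drop_left' (by rw [PySem.List.length_pyRange_one]; omega)]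
    · have hlen : (PySem.List.pyRange a b 1).length ≤ g := by
        rw [PySem.List.length_pyRange_one]; omega
      rw [List.drop_eq_nil_of_le hlen, PySem.List.pyRange_one_eq_nil (by omega)]
  · rw [PySem.List.pyRange_one_eq_nil (by omega), PySem.List.pyRange_one_eq_nil (by omega),
      List.drop_nil]

-- core: B's repeated head-slice pass over range(a, b) is A's per-start chunk map
theorem pv_chunk_eq (g : Nat) (hg : 0 < g) (n : Nat) : ∀ (a b : Int), (b - a).toNat ≤ n →
    pvPending g (PySem.List.pyRange a b 1)
      = (PySem.List.pyRange a b (g : Int)).map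
          (fun s => PySem.List.pyRange s (min b (s + (g : Int))) 1) := by
  induction n with
  | zero =>
    intro a b hn
    rw [PySem.List.pyRange_one_eq_nil (by omega),
      PySem.List.pyRange_of_pos _ _ (by exact_mod_cast hg : (0 : Int) < g), if_neg (by omega)]
    rw [pvPending]
    simp
  | succ n ih =>
    intro a b hn
    by_cases hab : a < b
    · rw [PySem.List.pyRange_one_cons hab, pvPending_cons g hg,
        ← PySem.List.pyRange_one_cons hab, pv_take_range, pv_drop_range,
        pv_range_cons (g : Int) a b (by exact_mod_cast hg) hab, List.map_cons]
      congr 1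
      exact ih (a + g) b (by omega)
    · rw [PySem.List.pyRange_one_eq_nil (by omega),
        PySem.List.pyRange_of_pos _ _ (by exact_mod_cast hg : (0 : Int) < g), if_neg hab]
      rw [pvPending]
      simp

-- ===== VERDICT (by name: the statement is the Claim_ definition above) =====
theorem build_highlight_groups_py_spec : Claim_equal_build_highlight_groups_py := by
  intro words _
  unfold Spec_build_highlight_groups_py build_highlight_groups_py build_highlight_groups_py_alt
  by_cases h0 : (words.length : Int) ≤ 0
  · simp only [if_pos h0, if_pos (by omega : ((words.length : Nat) : Int) = 0)]
  · simp only [if_neg h0, if_neg (by omega : ¬ ((words.length : Nat) : Int) = 0)]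
    set c : Int := (words.length : Int) with hc
    set gs : Int := if c ≤ 4 then 1 else if c ≤ 8 then 2 else 3 with hgs
    have hpos : 0 < gs := by rw [hgs]; split_ifs <;> omega
    have hcast : ((gs.toNat : Nat) : Int) = gs := by omega
    rw [PySem.List.foldl_append_singleton_eq_map, List.nil_append,
      pv_chunk_eq gs.toNat (by omega) c.toNat 0 c (by omega), hcast]
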